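-- pv_equiv track=rewrite | github.com/bazaartechnologies/techradar | data-etl/src/classifier_enhanced.py | _infer_quadrant
-- ===== SOURCE A (Python) =====
-- def _infer_quadrant(tech_name: str) -> int:
--     """Infer quadrant from technology name (fallback)."""
--     tech_lower = tech_name.lower()
--
--     # Languages & Frameworks
--     languages = ['python', 'javascript', 'typescript', 'java', 'go', 'rust', 'php', 'ruby', 'kotlin', 'c++', 'c#']
--     frameworks = ['react', 'vue', 'angular', 'django', 'flask', 'express', 'next.js', 'rails', 'laravel']
--
--     if any(lang in tech_lower for lang in languages + frameworks):
--         return 3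
--
--     # Platforms
--     platforms = ['docker', 'kubernetes', 'aws', 'azure', 'gcp', 'postgres', 'mysql', 'mongodb', 'redis']
--     if any(plat in tech_lower for plat in platforms):
--         return 2
--
--     # Tools
--     tools = ['webpack', 'vite', 'jest', 'pytest', 'eslint', 'prettier', 'github', 'maven', 'gradle']
--     if any(tool in tech_lower for tool in tools):
--         return 1
--
--     # Default to Techniques
--     return 0
-- ===== SOURCE B (Python) =====
-- _PRIORITY = {
--     # languages & frameworks -> 3
--     'python': 3, 'javascript': 3, 'typescript': 3, 'java': 3, 'go': 3, 'rust': 3,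
--     'php': 3, 'ruby': 3, 'kotlin': 3, 'c++': 3, 'c#': 3,
--     'react': 3, 'vue': 3, 'angular': 3, 'django': 3, 'flask': 3, 'express': 3,
--     'next.js': 3, 'rails': 3, 'laravel': 3,
--     # platforms -> 2
--     'docker': 2, 'kubernetes': 2, 'aws': 2, 'azure': 2, 'gcp': 2, 'postgres': 2,
--     'mysql': 2, 'mongodb': 2, 'redis': 2,
--     # tools -> 1
--     'webpack': 1, 'vite': 1, 'jest': 1, 'pytest': 1, 'eslint': 1, 'prettier': 1,
--     'github': 1, 'maven': 1, 'gradle': 1,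
-- }
--
--
-- def _infer_quadrant(tech_name: str) -> int:
--     """Infer quadrant from technology name (fallback)."""
--     tech_lower = tech_name.lower()
--     return max((p for kw, p in _PRIORITY.items() if kw in tech_lower), default=0)
-- ===== Notes on version B (the rewrite author's own statement) =====
-- stated objective: simpler
-- what changed: Replaced the three staged any()-then-early-return category checks with one flat keyword-to-priority table reduced by a single max-over-matches scan (default 0).
import Mathlib
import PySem

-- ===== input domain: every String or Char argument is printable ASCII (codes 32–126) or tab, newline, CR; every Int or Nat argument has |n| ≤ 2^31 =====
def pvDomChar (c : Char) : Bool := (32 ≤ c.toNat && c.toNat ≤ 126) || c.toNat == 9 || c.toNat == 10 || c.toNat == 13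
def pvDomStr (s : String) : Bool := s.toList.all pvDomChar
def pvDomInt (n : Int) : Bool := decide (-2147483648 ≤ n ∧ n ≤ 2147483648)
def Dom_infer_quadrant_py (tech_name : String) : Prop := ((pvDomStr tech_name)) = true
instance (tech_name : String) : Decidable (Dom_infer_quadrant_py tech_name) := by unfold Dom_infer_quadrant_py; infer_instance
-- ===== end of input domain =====

-- B replaces A's three staged any()/early-return category checks by one flat keyword→priority
-- table reduced with a single max-over-matches scan (default 0); objective: simpler.

-- ===== PORT A =====
def infer_quadrant_py (tech_name : String) : Int :=
  let tech_lower := PySem.Str.lower tech_name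
  let languages : List String := ["python", "javascript", "typescript", "java", "go", "rust", "php", "ruby", "kotlin", "c++", "c#"]
  let frameworks : List String := ["react", "vue", "angular", "django", "flask", "express", "next.js", "rails", "laravel"]
  if (languages ++ frameworks).any (fun lang => PySem.Str.isIn lang tech_lower) then 3
  else
    let platforms : List String := ["docker", "kubernetes", "aws", "azure", "gcp", "postgres", "mysql", "mongodb", "redis"]
    if platforms.any (fun plat => PySem.Str.isIn plat tech_lower) then 2
    else
      let tools : List String := ["webpack", "vite", "jest", "pytest", "eslint", "prettier", "github", "maven", "gradle"]
      if tools.any (fun tool => PySem.Str.isIn tool tech_lower) then 1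
      else 0

-- ===== PORT B =====
-- the module-level _PRIORITY dict of Source B, in insertion order
def pvPriorityTable : List (String × Int) :=
  [("python", 3), ("javascript", 3), ("typescript", 3), ("java", 3), ("go", 3), ("rust", 3),
   ("php", 3), ("ruby", 3), ("kotlin", 3), ("c++", 3), ("c#", 3),
   ("react", 3), ("vue", 3), ("angular", 3), ("django", 3), ("flask", 3), ("express", 3),
   ("next.js", 3), ("rails", 3), ("laravel", 3),
   ("docker", 2), ("kubernetes", 2), ("aws", 2), ("azure", 2), ("gcp", 2), ("postgres", 2),
   ("mysql", 2), ("mongodb", 2), ("redis", 2),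
   ("webpack", 1), ("vite", 1), ("jest", 1), ("pytest", 1), ("eslint", 1), ("prettier", 1),
   ("github", 1), ("maven", 1), ("gradle", 1)]

def infer_quadrant_py_alt (tech_name : String) : Int :=
  let tech_lower := PySem.Str.lower tech_name
  -- max((p for kw, p in _PRIORITY.items() if kw in tech_lower), default=0)
  PySem.List.maxD
    (pvPriorityTable.filterMap (fun kp => if PySem.Str.isIn kp.1 tech_lower then some kp.2 else none))
    (fun p => p) 0

-- ===== PRECONDITION & SPEC =====
def Spec_infer_quadrant_py (tech_name : String) (out : Int) : Prop := out = infer_quadrant_py_alt tech_name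
instance (tech_name : String) (out : Int) : Decidable (Spec_infer_quadrant_py tech_name out) := by unfold Spec_infer_quadrant_py; infer_instance

-- ===== CLAIM (what is proved, stated in full; the proofs are below) =====
def Claim_equal_infer_quadrant_py : Prop := ∀ (tech_name : String), Dom_infer_quadrant_py tech_name → Spec_infer_quadrant_py tech_name (infer_quadrant_py tech_name)

-- ===== LEMMAS AND PROOFS =====

-- the fold step of PySem.List.max? with key = id on Int
def pvStep (acc : Option Int) (x : Int) : Option Int :=
  match acc with
  | none => some x
  | some m => if m < x then some x else some m

lemma pv_max?_id_eq (xs : List Int) :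
    PySem.List.max? xs (fun p => p) = xs.foldl pvStep none := by
  unfold PySem.List.max? pvStep
  congr 1
  funext acc x
  cases acc <;> rfl

-- folding the max?-step over the matched priorities of one category (every entry has priority p)
lemma pv_fold_group (c : String → Bool) (g : List String) (p : Int) (acc : Option Int) :
    ((g.map (fun k => (k, p))).filterMap
        (fun kp => if c kp.1 then some kp.2 else none)).foldl pvStep acc
      = if g.any c then some (max (acc.getD p) p) else acc := by
  induction g generalizing acc with
  | nil => simp
  | cons k t ih =>
    by_cases hk : c k
    · have hstep : pvStep acc p = some (max (acc.getD p) p) := by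
        cases acc with
        | none => simp [pvStep]
        | some m =>
          simp only [pvStep, Option.getD_some]
          split_ifs with h <;> simp <;> omega
      simp only [List.map_cons, List.filterMap_cons, hk, if_pos, List.foldl_cons, hstep,
        List.any_cons, Bool.true_or, if_true, ih]
      by_cases ht : t.any c
      · rw [if_pos ht]
        simp only [Option.getD_some]
        congr 1
        omega
      · rw [if_neg ht]
    · rw [Bool.not_eq_true] at hk
      simp only [List.map_cons, List.filterMap_cons, hk, Bool.false_eq_true, reduceIte,
        List.any_cons, Bool.false_or]
      exact ih acc

-- combining the three categories: max over all matches = the staged early-return chain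
lemma pv_combine (c : String → Bool) (L P T : List String) :
    (((L.map (fun k => (k, (3 : Int))) ++ P.map (fun k => (k, (2 : Int)))
        ++ T.map (fun k => (k, (1 : Int)))).filterMap
          (fun kp => if c kp.1 then some kp.2 else none)).foldl pvStep none).getD 0
      = if L.any c then 3 else if P.any c then 2 else if T.any c then 1 else 0 := by
  rw [List.filterMap_append, List.filterMap_append, List.foldl_append, List.foldl_append]
  rw [pv_fold_group c L 3 none, pv_fold_group c P 2, pv_fold_group c T 1]
  by_cases h3 : L.any c <;> by_cases h2 : P.any c <;> by_cases h1 : T.any c <;>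
    simp [h3, h2, h1]

-- ===== VERDICT (by name: the statement is the Claim_ definition above) =====
theorem infer_quadrant_py_spec : Claim_equal_infer_quadrant_py := by
  intro tech_name _
  unfold Spec_infer_quadrant_py infer_quadrant_py infer_quadrant_py_alt
  have hsplit : pvPriorityTable
      = (["python", "javascript", "typescript", "java", "go", "rust", "php", "ruby", "kotlin", "c++", "c#",
          "react", "vue", "angular", "django", "flask", "express", "next.js", "rails", "laravel"].map
            (fun k => (k, (3 : Int))))
        ++ (["docker", "kubernetes", "aws", "azure", "gcp", "postgres", "mysql", "mongodb", "redis"].map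
            (fun k => (k, (2 : Int))))
        ++ (["webpack", "vite", "jest", "pytest", "eslint", "prettier", "github", "maven", "gradle"].map
            (fun k => (k, (1 : Int)))) := by rfl
  rw [PySem.List.maxD, pv_max?_id_eq, hsplit,
    pv_combine (fun kw => PySem.Str.isIn kw (PySem.Str.lower tech_name))]
  rfl
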